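-- pv_equiv track=rewrite | github.com/MdAbedin/binarysearch | 0891 Tree Detection.py | solve
-- ===== SOURCE A (Python) =====
-- def solve(left, right):
--     if any(left[i]==i or right[i]==i for i in range(len(left))) or sum(c != -1 for c in left) + sum(c != -1 for c in right) != len(left)-1: return False
--
--     parents = list(set(range(len(left)))-(set(left)|set(right)))
--
--     if len(parents) != 1: return False
--
--     seen = {parents[0]}
--     dfs = [parents[0]]
--     while dfs:
--       cur = dfs.pop()
--
--       if left[cur] != -1:
--         if left[cur] not in seen:
--           dfs.append(left[cur])
--           seen.add(left[cur])
--         else: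
--           return False
--       if right[cur] != -1:
--         if right[cur] not in seen:
--           dfs.append(right[cur])
--           seen.add(right[cur])
--         else:
--           return False
--
--     return len(seen) == len(left)
-- ===== SOURCE B (Python) =====
-- def solve(left, right):
--     if any(left[i]==i or right[i]==i for i in range(len(left))) or sum(c != -1 for c in left) + sum(c != -1 for c in right) != len(left)-1: return False
--
--     parents = list(set(range(len(left)))-(set(left)|set(right)))
--
--     if len(parents) != 1: return False
--
--     seen = {parents[0]}
--     for _ in range(len(left)):
--         seen |= {c for i in seen for c in (left[i], right[i]) if c != -1}
--
--     return len(seen) == len(left)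
-- ===== Notes on version B (the rewrite author's own statement) =====
-- stated objective: alternative
-- what changed: Replaced the stack-based DFS with a seen-set and early 'already visited' exits by an n-round reachability-closure fixpoint over a plain set (when the three guards pass the n-1 child slots are necessarily distinct and in range, so the traversal only has to measure reachability from the unique root).
import Mathlib
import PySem

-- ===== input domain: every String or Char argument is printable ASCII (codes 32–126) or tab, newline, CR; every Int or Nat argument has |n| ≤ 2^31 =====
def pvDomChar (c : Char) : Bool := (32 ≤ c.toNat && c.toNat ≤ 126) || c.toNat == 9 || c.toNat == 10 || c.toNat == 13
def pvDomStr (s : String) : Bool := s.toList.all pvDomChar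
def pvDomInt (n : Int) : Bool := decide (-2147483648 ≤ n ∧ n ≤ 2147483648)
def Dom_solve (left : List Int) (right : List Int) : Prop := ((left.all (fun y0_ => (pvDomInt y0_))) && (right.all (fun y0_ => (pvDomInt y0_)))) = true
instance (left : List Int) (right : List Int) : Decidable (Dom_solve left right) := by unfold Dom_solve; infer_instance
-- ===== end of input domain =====

-- B replaces A's stack DFS (with its early 'already seen' exits) by an n-round reachability-closure
-- fixpoint over a set; the three early guards are kept verbatim.  Objective: alternative algorithm.

-- ===== PORT A =====
-- any(left[i]==i or right[i]==i for i in range(len(left)))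
-- (pyGetD is exact for left since i < len(left); for right it is exact on Pre_, where an index
--  actually evaluated by the Python generator is < len(right))
def selfGuard (left right : List Int) : Bool :=
  (List.range left.length).any (fun i =>
    decide (PySem.List.pyGetD left (i : Int) 0 = (i : Int)) ||
    decide (PySem.List.pyGetD right (i : Int) 0 = (i : Int)))

-- sum(c != -1 for c in xs)
def edgeSum (xs : List Int) : Int := (xs.map (fun c => if c ≠ -1 then (1 : Int) else 0)).sum

-- list(set(range(len(left)))-(set(left)|set(right)))  (list order only used when the length is 1)
def parentsOf (left right : List Int) : List Int :=
  PySem.Set.diff (PySem.Set.ofList (PySem.List.pyRange 0 (left.length : Int) 1))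
    (PySem.Set.union (PySem.Set.ofList left) right)

-- one 'if left[cur] != -1: …' block of A's loop body: none = 'return False'
def childStep (seen : PySem.Set Int) (stack : List Int) (c : Int) :
    Option (PySem.Set Int × List Int) :=
  if c = -1 then some (seen, stack)
  else if PySem.Set.contains seen c then none
  else some (PySem.Set.add seen c, c :: stack)

-- A's 'while dfs:' loop; the stack head is the top (Python list end); fuel (left.length + 1 at the
-- call site) is only to make the recursion structural — on Pre_ the loop runs at most n times
def dfsA (left right : List Int) : PySem.Set Int → List Int → Nat → Bool
  | _, _, 0 => false
  | seen, stack, fuel+1 =>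
    match stack with
    | [] => decide (seen.length = left.length)
    | cur :: rest =>
      match childStep seen rest (PySem.List.pyGetD left cur 0) with
      | none => false
      | some (seen1, st1) =>
        match childStep seen1 st1 (PySem.List.pyGetD right cur 0) with
        | none => false
        | some (seen2, st2) => dfsA left right seen2 st2 fuel

def solve (left : List Int) (right : List Int) : Bool :=
  if selfGuard left right = true ∨ edgeSum left + edgeSum right ≠ (left.length : Int) - 1 then false
  else
    let parents := parentsOf left right
    if parents.length ≠ 1 then false
    else
      let root := PySem.List.pyGetD parents 0 0
      dfsA left right (PySem.Set.ofList [root]) [root] (left.length + 1)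

-- ===== PORT B =====
-- seen | {c for i in seen for c in (left[i], right[i]) if c != -1}
def closeStep (left right : List Int) (s : PySem.Set Int) : PySem.Set Int :=
  PySem.Set.union s (s.flatMap (fun i =>
    List.filter (fun c => decide (c ≠ -1))
      [PySem.List.pyGetD left i 0, PySem.List.pyGetD right i 0]))

def solve_alt (left : List Int) (right : List Int) : Bool :=
  if selfGuard left right = true ∨ edgeSum left + edgeSum right ≠ (left.length : Int) - 1 then false
  else
    let parents := parentsOf left right
    if parents.length ≠ 1 then false
    else
      let root := PySem.List.pyGetD parents 0 0
      let final := (List.range left.length).foldl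
        (fun s _ => closeStep left right s) (PySem.Set.ofList [root])
      decide (final.length = left.length)

-- ===== PRECONDITION & SPEC =====
-- Pre_ is exactly the no-IndexError condition of A: if right is at least as long as left nothing can
-- raise (the DFS only runs when the guards pass, and then every child index lies in range — see
-- kids_of_guards below); if right is shorter, A returns (False) only when the self-child test fires
-- before the generator evaluates right[len(right)].
def Pre_solve (left : List Int) (right : List Int) : Prop :=
  left.length ≤ right.length ∨
  ∃ i < left.length, i ≤ right.length ∧
    (left.getD i 0 = (i : Int) ∨ (i < right.length ∧ right.getD i 0 = (i : Int)))
instance (left : List Int) (right : List Int) : Decidable (Pre_solve left right) := by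
  unfold Pre_solve; infer_instance

def pvWitness_solve : List Int × List Int := ([-1], [-1])

def Spec_solve (left : List Int) (right : List Int) (out : Bool) : Prop := out = solve_alt left right
instance (left : List Int) (right : List Int) (out : Bool) : Decidable (Spec_solve left right out) := by
  unfold Spec_solve; infer_instance

-- ===== CLAIM (what is proved, stated in full; the proofs are below) =====
def Claim_equal_solve : Prop := ∀ (left : List Int) (right : List Int), Dom_solve left right → Pre_solve left right → Spec_solve left right (solve left right)

-- ===== LEMMAS AND PROOFS =====

-- the child relation of the two arrays, and reachability from r
def isChild (left right : List Int) (u c : Int) : Prop :=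
  c ≠ -1 ∧ (PySem.List.pyGetD left u 0 = c ∨ PySem.List.pyGetD right u 0 = c)

inductive Reach (left right : List Int) (r : Int) : Int → Prop
  | refl : Reach left right r r
  | step {u c : Int} : Reach left right r u → isChild left right u c → Reach left right r c

-- the list of child slots; guards force it to be duplicate-free and in range
def kids (left right : List Int) : List Int := (left ++ right).filter (fun c => decide (c ≠ -1))

-- context extracted from the three guards (plus len left ≤ len right)
structure GC (left right : List Int) (r : Int) : Prop where
  hlen : left.length ≤ right.length
  hself : ∀ i < left.length, PySem.List.pyGetD left (i : Int) 0 ≠ (i : Int) ∧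
            PySem.List.pyGetD right (i : Int) 0 ≠ (i : Int)
  hnodup : (kids left right).Nodup
  hrange : ∀ c ∈ kids left right, 0 ≤ c ∧ c < (left.length : Int)
  hr0 : 0 ≤ r
  hr1 : r < (left.length : Int)
  hrl : r ∉ left
  hrr : r ∉ right

theorem edgeSum_eq (xs : List Int) :
    edgeSum xs = ((xs.filter (fun c => decide (c ≠ -1))).length : Int) := by
  rw [edgeSum]
  have h : (xs.map (fun c => if c ≠ -1 then (1 : Int) else 0)).sum =
      (xs.map (fun c => if (fun c => decide (c ≠ -1)) c = true then (1 : Int) else 0)).sum := by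
    congr 1
    apply List.map_congr_left
    intro a _
    by_cases h : a = -1 <;> simp [h]
  rw [h, PySem.List.sum_map_ite_one_zero, List.countP_eq_length_filter]

theorem kids_of_guards (left right : List Int)
    (hlen : left.length ≤ right.length)
    (hself : selfGuard left right = false)
    (hsum : edgeSum left + edgeSum right = (left.length : Int) - 1)
    (hpar : (parentsOf left right).length = 1) :
    GC left right (PySem.List.pyGetD (parentsOf left right) 0 0) := by
  have hselfF : ∀ i < left.length, PySem.List.pyGetD left (i : Int) 0 ≠ (i : Int) ∧
      PySem.List.pyGetD right (i : Int) 0 ≠ (i : Int) := by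
    intro i hi
    have := List.any_eq_false.mp hself i (List.mem_range.mpr hi)
    constructor <;> intro h <;> simp [h] at this
  -- edge count
  rw [edgeSum_eq, edgeSum_eq] at hsum
  have hn1 : 1 ≤ left.length := by omega
  have hklen : (kids left right).length = left.length - 1 := by
    rw [kids, List.filter_append, List.length_append]; omega
  -- the universe list and the root
  set n := left.length with hnn
  set R : List Int := PySem.List.pyRange 0 (n : Int) 1 with hR
  have hRnodup : R.Nodup := PySem.List.nodup_pyRange_one 0 (n : Int)
  have hRmem : ∀ v, v ∈ R ↔ 0 ≤ v ∧ v < (n : Int) := by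
    intro v
    rw [hR, PySem.List.mem_pyRange_one]
  have hPmem : ∀ v, v ∈ parentsOf left right ↔
      (0 ≤ v ∧ v < (n : Int)) ∧ ¬(v ∈ left ∨ v ∈ right) := by
    intro v
    rw [parentsOf, PySem.Set.mem_diff, PySem.Set.ofList_eq_self_of_nodup _ hRnodup, hRmem,
      PySem.Set.mem_union, PySem.Set.mem_ofList]
  have hPnodup : (parentsOf left right).Nodup := by
    rw [parentsOf]
    exact PySem.Set.nodup_diff _ _ (by rw [PySem.Set.ofList_eq_self_of_nodup _ hRnodup]; exact hRnodup)
  -- parents = [r]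
  obtain ⟨r, hPr⟩ : ∃ r, parentsOf left right = [r] := by
    cases hP : parentsOf left right with
    | nil => rw [hP] at hpar; simp at hpar
    | cons a as =>
      rw [hP] at hpar
      simp at hpar
      exact ⟨a, by rw [hpar]⟩
  have hroot : PySem.List.pyGetD (parentsOf left right) 0 0 = r := by
    rw [hPr, PySem.List.pyGetD_zero_cons]
  have hrmem := (hPmem r).mp (by rw [hPr]; exact List.mem_cons_self ..)
  -- the distinct in-range child values
  set D : List Int := R.filter (fun v => decide (v ∈ left) || decide (v ∈ right)) with hD
  have hDnodup : D.Nodup := List.Nodup.filter _ hRnodup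
  have hDmem : ∀ v, v ∈ D ↔ (0 ≤ v ∧ v < (n : Int)) ∧ (v ∈ left ∨ v ∈ right) := by
    intro v
    rw [hD, List.mem_filter, hRmem]
    simp
  have hperm : R.Perm (parentsOf left right ++ D) := by
    rw [List.perm_ext_iff_of_nodup hRnodup ?_]
    · intro v
      rw [List.mem_append, hPmem, hDmem, hRmem]
      by_cases h : v ∈ left ∨ v ∈ right <;> by_cases h2 : 0 ≤ v ∧ v < (n : Int) <;> simp [h, h2]
    · rw [List.nodup_append]
      refine ⟨hPnodup, hDnodup, ?_⟩
      intro a ha b hb rfl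
      exact ((hPmem a).mp ha).2 ((hDmem a).mp hb).2
  have hDlen : D.length = n - 1 := by
    have := hperm.length_eq
    rw [List.length_append, hpar] at this
    have hRlen : R.length = n := by
      rw [hR, PySem.List.length_pyRange_one]
      omega
    omega
  -- D sits inside kids, which has the same length: pigeonhole
  have hDsub : ∀ v ∈ D, v ∈ kids left right := by
    intro v hv
    obtain ⟨⟨h0, h1⟩, hm⟩ := (hDmem v).mp hv
    rw [kids, List.mem_filter, List.mem_append]
    refine ⟨hm, ?_⟩
    simp only [decide_eq_true_eq]
    omega
  have hFsub : D.toFinset ⊆ (kids left right).toFinset := by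
    intro v hv
    rw [List.mem_toFinset] at hv ⊢
    exact hDsub v hv
  have hDcard : D.toFinset.card = n - 1 := by
    rw [List.card_toFinset, List.dedup_eq_self.mpr hDnodup, hDlen]
  have hFcard : (kids left right).toFinset.card ≤ n - 1 := by
    have := List.toFinset_card_le (kids left right)
    omega
  have hFeq : D.toFinset = (kids left right).toFinset :=
    Finset.eq_of_subset_of_card_le hFsub (by omega)
  have hknodup : (kids left right).Nodup := by
    have hcard : (kids left right).toFinset.card = (kids left right).length := by
      rw [← hFeq, hDcard, hklen]
    rw [List.card_toFinset] at hcard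
    rw [← List.Sublist.eq_of_length (List.dedup_sublist _) hcard]
    exact List.nodup_dedup _
  refine ⟨hlen, hselfF, hknodup, ?_, ?_, ?_, ?_, ?_⟩
  · intro c hc
    have : c ∈ D.toFinset := by rw [hFeq, List.mem_toFinset]; exact hc
    rw [List.mem_toFinset] at this
    exact ((hDmem c).mp this).1
  · rw [hroot]; exact hrmem.1.1
  · rw [hroot]; exact hrmem.1.2
  · rw [hroot]; intro h; exact hrmem.2 (Or.inl h)
  · rw [hroot]; intro h; exact hrmem.2 (Or.inr h)

theorem child_mem_kids (left right : List Int) (r : Int) (g : GC left right r)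
    {u c : Int} (hu0 : 0 ≤ u) (hu1 : u < (left.length : Int))
    (hc : isChild left right u c) : c ∈ kids left right := by
  obtain ⟨hc1, hc2⟩ := hc
  have hm : c ∈ left ++ right := by
    have hlen := g.hlen
    rcases hc2 with h | h
    · exact List.mem_append_left _
        (h ▸ PySem.List.pyGetD_mem (xs := left) (i := u) (d := 0)
          (by simp [PySem.Raise.InRange]; omega))
    · exact List.mem_append_right _
        (h ▸ PySem.List.pyGetD_mem (xs := right) (i := u) (d := 0)
          (by simp [PySem.Raise.InRange]; omega))
  simp only [kids, List.mem_filter]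
  simp [hm, hc1]

-- a value sitting at two distinct positions is counted at least twice
theorem two_le_count {α : Type} [DecidableEq α] (l : List α) {i j : Nat} {c : α}
    (hi : i < l.length) (hj : j < l.length) (hij : i < j)
    (h1 : l[i] = c) (h2 : l[j] = c) : 2 ≤ l.count c := by
  have hsplit : l = l.take j ++ l.drop j := (List.take_append_drop j l).symm
  have hc1 : c ∈ l.take j := by
    have hlen : i < (l.take j).length := by simp [List.length_take]; omega
    exact List.mem_iff_getElem.mpr ⟨i, hlen, by rw [List.getElem_take, h1]⟩
  have hc2 : c ∈ l.drop j := by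
    have hlen : 0 < (l.drop j).length := by simp [List.length_drop]; omega
    exact List.mem_iff_getElem.mpr ⟨0, hlen, by rw [List.getElem_drop]; simpa using h2⟩
  have g1 := List.one_le_count_iff.mpr hc1
  have g2 := List.one_le_count_iff.mpr hc2
  have heq : l.count c = (l.take j).count c + (l.drop j).count c := by
    conv_lhs => rw [hsplit]
    exact List.count_append
  omega

-- membership of a child slot in the filtered halves
theorem slot_mem_lf (left : List Int) {u c : Int}
    (hu0 : 0 ≤ u) (hu1 : u < (left.length : Int)) (hc : c ≠ -1)
    (h : PySem.List.pyGetD left u 0 = c) : c ∈ left.filter (fun c => decide (c ≠ -1)) := by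
  rw [PySem.List.pyGetD_eq_getElem _ _ hu0 (by omega)] at h
  exact List.mem_filter.mpr ⟨h ▸ List.getElem_mem (by omega), by simpa using hc⟩

-- two distinct in-range parents cannot point at the same child (kids is duplicate-free)
theorem no_two_parents (left right : List Int) (r : Int) (g : GC left right r)
    {u v c : Int} (hu0 : 0 ≤ u) (hu1 : u < (left.length : Int))
    (hv0 : 0 ≤ v) (hv1 : v < (left.length : Int)) (huv : u ≠ v)
    (hcu : isChild left right u c) (hcv : isChild left right v c) : False := by
  have hnd := g.hnodup
  rw [kids, List.filter_append] at hnd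
  rw [List.nodup_append] at hnd
  obtain ⟨hlf, hrf, hdisj⟩ := hnd
  obtain ⟨hc, hcu⟩ := hcu
  obtain ⟨-, hcv⟩ := hcv
  have hlen := g.hlen
  have htwo : ∀ (xs : List Int), (xs.filter (fun c => decide (c ≠ -1))).Nodup →
      (left.length : Int) ≤ (xs.length : Int) →
      PySem.List.pyGetD xs u 0 = c → PySem.List.pyGetD xs v 0 = c → False := by
    intro xs hnd hxl h1 h2
    rw [PySem.List.pyGetD_eq_getElem _ _ hu0 (by omega)] at h1
    rw [PySem.List.pyGetD_eq_getElem _ _ hv0 (by omega)] at h2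
    have hne : u.toNat ≠ v.toNat := by omega
    have h2c : 2 ≤ xs.count c := by
      rcases Nat.lt_or_ge u.toNat v.toNat with hlt | hge
      · exact two_le_count xs (by omega) (by omega) hlt h1 h2
      · exact two_le_count xs (by omega) (by omega) (by omega) h2 h1
    have hcnt : (xs.filter (fun c => decide (c ≠ -1))).count c = xs.count c := by
      rw [List.count_filter]; simp [hc]
    have := List.nodup_iff_count_le_one.mp hnd c
    omega
  rcases hcu with h1 | h1 <;> rcases hcv with h2 | h2
  · exact htwo left hlf (by omega) h1 h2
  · exact hdisj c (slot_mem_lf left hu0 hu1 hc h1) c (slot_mem_lf right hv0 (by omega) hc h2) rfl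
  · exact hdisj c (slot_mem_lf left hv0 hv1 hc h2) c (slot_mem_lf right hu0 (by omega) hc h1) rfl
  · exact htwo right hrf (by exact_mod_cast Nat.cast_le.mpr g.hlen) h1 h2

-- a same node cannot point at the same child with both slots
theorem no_double_slot (left right : List Int) (r : Int) (g : GC left right r)
    {u c : Int} (hu0 : 0 ≤ u) (hu1 : u < (left.length : Int)) (hc : c ≠ -1)
    (h1 : PySem.List.pyGetD left u 0 = c) (h2 : PySem.List.pyGetD right u 0 = c) : False := by
  have hnd := g.hnodup
  rw [kids, List.filter_append, List.nodup_append] at hnd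
  exact hnd.2.2 c (slot_mem_lf left hu0 hu1 hc h1) c
    (slot_mem_lf right hu0 (by have := g.hlen; omega) hc h2) rfl

-- a child is never the root and never its own parent
theorem child_facts (left right : List Int) (r : Int) (g : GC left right r)
    {u c : Int} (hu0 : 0 ≤ u) (hu1 : u < (left.length : Int))
    (hc : isChild left right u c) :
    0 ≤ c ∧ c < (left.length : Int) ∧ c ≠ r ∧ c ≠ u := by
  have hk := child_mem_kids left right r g hu0 hu1 hc
  obtain ⟨h0, h1⟩ := g.hrange c hk
  refine ⟨h0, h1, ?_, ?_⟩
  · rintro rfl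
    have : c ∈ left ++ right := by
      rw [kids] at hk
      exact List.mem_of_mem_filter hk
    rcases List.mem_append.mp this with h | h
    · exact g.hrl h
    · exact g.hrr h
  · rintro rfl
    obtain ⟨hself1, hself2⟩ := g.hself c.toNat (by omega)
    have hcast : ((c.toNat : Int)) = c := by omega
    rw [hcast] at hself1 hself2
    rcases hc.2 with h | h
    · exact hself1 h
    · exact hself2 h

-- nodup in-range int lists have length ≤ n
theorem length_le_of_nodup_range (n : Nat) (l : List Int) (hn : l.Nodup)
    (hr : ∀ v ∈ l, 0 ≤ v ∧ v < (n : Int)) : l.length ≤ n := by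
  have hsub : l ⊆ PySem.List.pyRange 0 n 1 := by
    intro v hv
    rcases hr v hv with ⟨h0, h1⟩
    rw [PySem.List.mem_pyRange_one]
    omega
  have := (List.subperm_of_subset hn hsub).length_le
  rwa [PySem.List.length_pyRange_one, show ((n : Int) - 0).toNat = n by omega] at this

-- the DFS invariant
structure DfsInv (left right : List Int) (r : Int) (seen stack : List Int) : Prop where
  snd : seen.Nodup
  srange : ∀ v ∈ seen, 0 ≤ v ∧ v < (left.length : Int)
  sreach : ∀ v ∈ seen, Reach left right r v
  rseen : r ∈ seen
  sub : ∀ v ∈ stack, v ∈ seen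
  stnd : stack.Nodup
  closed : ∀ u ∈ seen, u ∉ stack → ∀ c, isChild left right u c → c ∈ seen
  origin : ∀ c ∈ seen, c = r ∨ ∃ u, u ∈ seen ∧ u ∉ stack ∧ isChild left right u c

theorem reach_sub (left right : List Int) (r : Int) {seen : List Int}
    (hcl : ∀ u ∈ seen, ∀ c, isChild left right u c → c ∈ seen) (hr : r ∈ seen)
    {v : Int} (hv : Reach left right r v) : v ∈ seen := by
  induction hv with
  | refl => exact hr
  | step hu hc ih => exact hcl _ ih _ hc

theorem child_not_seen (left right : List Int) (r : Int) (g : GC left right r)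
    {seen rest : List Int} {cur : Int} (inv : DfsInv left right r seen (cur :: rest))
    {c : Int} (hc : isChild left right cur c) : c ∉ seen := by
  have hcur : cur ∈ seen := inv.sub cur (List.mem_cons_self ..)
  obtain ⟨hcur0, hcur1⟩ := inv.srange cur hcur
  intro hcs
  rcases inv.origin c hcs with hcr | ⟨u, hus, hust, huc⟩
  · exact (child_facts left right r g hcur0 hcur1 hc).2.2.1 hcr
  · obtain ⟨hu0, hu1⟩ := inv.srange u hus
    have hne : u ≠ cur := fun h => hust (h ▸ List.mem_cons_self ..)
    exact no_two_parents left right r g hu0 hu1 hcur0 hcur1 hne huc hc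

theorem dfsInv_push (left right : List Int) (r : Int) (g : GC left right r)
    {seen rest : List Int} {cur : Int} (inv : DfsInv left right r seen (cur :: rest))
    (ps : List Int) (hnd : ps.Nodup) (hnew : ∀ p ∈ ps, p ∉ seen)
    (hch : ∀ p ∈ ps, isChild left right cur p)
    (hcov : ∀ c, isChild left right cur c → c ∈ seen ++ ps) :
    DfsInv left right r (seen ++ ps) (ps.reverse ++ rest) := by
  have hcur : cur ∈ seen := inv.sub cur (List.mem_cons_self ..)
  obtain ⟨hcur0, hcur1⟩ := inv.srange cur hcur
  have hcurrest : cur ∉ rest := (List.nodup_cons.mp inv.stnd).1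
  refine ⟨?_, ?_, ?_, ?_, ?_, ?_, ?_, ?_⟩
  · rw [List.nodup_append]
    exact ⟨inv.snd, hnd, fun a ha b hb hab => hnew b hb (hab ▸ ha)⟩
  · intro v hv
    rcases List.mem_append.mp hv with h | h
    · exact inv.srange v h
    · have := child_facts left right r g hcur0 hcur1 (hch v h)
      exact ⟨this.1, this.2.1⟩
  · intro v hv
    rcases List.mem_append.mp hv with h | h
    · exact inv.sreach v h
    · exact Reach.step (inv.sreach cur hcur) (hch v h)
  · exact List.mem_append_left _ inv.rseen
  · intro v hv
    rcases List.mem_append.mp hv with h | h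
    · exact List.mem_append_right _ (List.mem_reverse.mp h)
    · exact List.mem_append_left _ (inv.sub v (List.mem_cons_of_mem _ h))
  · rw [List.nodup_append]
    refine ⟨List.nodup_reverse.mpr hnd, (List.nodup_cons.mp inv.stnd).2, ?_⟩
    intro a ha b hb hab
    subst hab
    exact hnew a (List.mem_reverse.mp ha) (inv.sub a (List.mem_cons_of_mem _ hb))
  · intro u hu hust c hc
    rcases List.mem_append.mp hu with h | h
    · by_cases hucur : u = cur
      · subst hucur; exact hcov c hc
      · have hns : u ∉ cur :: rest := by
          intro hmem
          rcases List.mem_cons.mp hmem with h' | h'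
          · exact hucur h'
          · exact hust (List.mem_append_right _ h')
        exact List.mem_append_left _ (inv.closed u h hns c hc)
    · exact absurd (List.mem_append_left rest (List.mem_reverse.mpr h)) hust
  · intro c hcm
    rcases List.mem_append.mp hcm with h | h
    · rcases inv.origin c h with h' | ⟨u, hus, hust, huc⟩
      · exact Or.inl h'
      · refine Or.inr ⟨u, List.mem_append_left _ hus, ?_, huc⟩
        intro hmem
        rcases List.mem_append.mp hmem with h'' | h''
        · exact hnew u (List.mem_reverse.mp h'') hus
        · exact hust (List.mem_cons_of_mem _ h'')
    · refine Or.inr ⟨cur, List.mem_append_left _ hcur, ?_, hch c h⟩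
      intro hmem
      rcases List.mem_append.mp hmem with h'' | h''
      · exact hnew cur (List.mem_reverse.mp h'') hcur
      · exact hcurrest h''

theorem childStep_skip (seen : PySem.Set Int) (stack : List Int) {c : Int} (h : c = -1) :
    childStep seen stack c = some (seen, stack) := by
  simp [childStep, h]

theorem childStep_push (seen : PySem.Set Int) (stack : List Int) {c : Int}
    (h1 : c ≠ -1) (h2 : c ∉ seen) :
    childStep seen stack c = some (seen ++ [c], c :: stack) := by
  simp [childStep, h1, h2]

theorem dfsA_eq (left right : List Int) (r : Int) (g : GC left right r)
    (C : List Int) (hCn : C.Nodup) (hCm : ∀ v, v ∈ C ↔ Reach left right r v) :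
    ∀ fuel seen stack, DfsInv left right r seen stack →
      stack.length + (left.length - seen.length) < fuel →
      dfsA left right seen stack fuel = decide (C.length = left.length) := by
  intro fuel
  induction fuel with
  | zero => intro seen stack _ hm; omega
  | succ fuel ih =>
    intro seen stack inv hm
    cases stack with
    | nil =>
      have hperm : seen.Perm C := by
        rw [List.perm_ext_iff_of_nodup inv.snd hCn]
        intro v
        constructor
        · intro h
          exact (hCm v).mpr (inv.sreach v h)
        · intro h
          exact reach_sub left right r
            (fun u hu c hc => inv.closed u hu (List.not_mem_nil) c hc) inv.rseen ((hCm v).mp h)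
      simp only [dfsA]
      rw [hperm.length_eq]
    | cons cur rest =>
      have hcur : cur ∈ seen := inv.sub cur (List.mem_cons_self ..)
      obtain ⟨hcur0, hcur1⟩ := inv.srange cur hcur
      simp only [dfsA]
      by_cases h1 : PySem.List.pyGetD left cur 0 = -1
      · by_cases h2 : PySem.List.pyGetD right cur 0 = -1
        · -- no child
          simp only [childStep_skip _ _ h1, childStep_skip _ _ h2]
          have inv' : DfsInv left right r (seen ++ []) (([] : List Int).reverse ++ rest) :=
            dfsInv_push left right r g inv [] (by simp) (by simp) (by simp)
              (by
                rintro c ⟨hcne, h | h⟩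
                · exact absurd (h ▸ h1) hcne
                · exact absurd (h ▸ h2) hcne)
          rw [List.append_nil] at inv'
          exact ih seen rest inv' (by simp at hm ⊢; omega)
        · -- right child only
          have hcrc : isChild left right cur (PySem.List.pyGetD right cur 0) := ⟨h2, Or.inr rfl⟩
          have hnot := child_not_seen left right r g inv hcrc
          simp only [childStep_skip _ _ h1, childStep_push _ _ h2 hnot]
          have inv' := dfsInv_push left right r g inv [PySem.List.pyGetD right cur 0]
            (by simp) (by simpa using hnot) (by simpa using hcrc)
            (by
              rintro c ⟨hcne, h | h⟩
              · exact absurd (h ▸ h1) hcne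
              · exact List.mem_append_right _ (by simp [← h]))
          have hb := length_le_of_nodup_range left.length _ inv'.snd inv'.srange
          refine ih _ _ inv' ?_
          simp at hm hb ⊢
          omega
      · have hclc : isChild left right cur (PySem.List.pyGetD left cur 0) := ⟨h1, Or.inl rfl⟩
        have hnotl := child_not_seen left right r g inv hclc
        simp only [childStep_push _ _ h1 hnotl]
        by_cases h2 : PySem.List.pyGetD right cur 0 = -1
        · -- left child only
          simp only [childStep_skip _ _ h2]
          have inv' := dfsInv_push left right r g inv [PySem.List.pyGetD left cur 0]
            (by simp) (by simpa using hnotl) (by simpa using hclc)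
            (by
              rintro c ⟨hcne, h | h⟩
              · exact List.mem_append_right _ (by simp [← h])
              · exact absurd (h ▸ h2) hcne)
          have hb := length_le_of_nodup_range left.length _ inv'.snd inv'.srange
          refine ih _ _ inv' ?_
          simp at hm hb ⊢
          omega
        · -- both children
          have hcrc : isChild left right cur (PySem.List.pyGetD right cur 0) := ⟨h2, Or.inr rfl⟩
          have hnotr : PySem.List.pyGetD right cur 0 ∉ seen ++ [PySem.List.pyGetD left cur 0] := by
            intro hmem
            rcases List.mem_append.mp hmem with h | h
            · exact child_not_seen left right r g inv hcrc h
            · have heq : PySem.List.pyGetD right cur 0 = PySem.List.pyGetD left cur 0 := by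
                simpa using h
              exact no_double_slot left right r g hcur0 hcur1 h2 heq.symm rfl
          simp only [childStep_push _ _ h2 hnotr]
          have inv' := dfsInv_push left right r g inv
            [PySem.List.pyGetD left cur 0, PySem.List.pyGetD right cur 0]
            (by
              refine List.nodup_cons.mpr ⟨?_, List.nodup_singleton _⟩
              intro hmem
              have heq : PySem.List.pyGetD left cur 0 = PySem.List.pyGetD right cur 0 := by
                simpa using hmem
              exact no_double_slot left right r g hcur0 hcur1 h2 heq rfl)
            (by
              intro p hp
              rcases List.mem_cons.mp hp with rfl | hp
              · exact hnotl
              · rw [List.mem_singleton] at hp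
                subst hp
                intro hmem
                exact child_not_seen left right r g inv hcrc hmem)
            (by
              intro p hp
              rcases List.mem_cons.mp hp with rfl | hp
              · exact hclc
              · rw [List.mem_singleton] at hp
                subst hp
                exact hcrc)
            (by
              rintro c ⟨hcne, h | h⟩
              · exact List.mem_append_right _ (by simp [← h])
              · exact List.mem_append_right _ (by simp [← h]))
          have hb := length_le_of_nodup_range left.length _ inv'.snd inv'.srange
          have hstack : (PySem.List.pyGetD right cur 0 ::
              PySem.List.pyGetD left cur 0 :: rest) =
              ([PySem.List.pyGetD left cur 0, PySem.List.pyGetD right cur 0]).reverse ++ rest := by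
            simp
          have hseen : (seen ++ [PySem.List.pyGetD left cur 0]) ++ [PySem.List.pyGetD right cur 0] =
              seen ++ [PySem.List.pyGetD left cur 0, PySem.List.pyGetD right cur 0] := by
            simp
          rw [hstack, hseen]
          refine ih _ _ inv' ?_
          simp at hm hb ⊢
          omega

-- the closure iterates
def iterClose (left right : List Int) (r : Int) (k : Nat) : PySem.Set Int :=
  (List.range k).foldl (fun s _ => closeStep left right s) (PySem.Set.ofList [r])

theorem iterClose_succ (left right : List Int) (r : Int) (k : Nat) :
    iterClose left right r (k+1) = closeStep left right (iterClose left right r k) := by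
  simp [iterClose, List.range_succ]

theorem mem_closeStep (left right : List Int) (s : PySem.Set Int) (v : Int) :
    v ∈ closeStep left right s ↔ v ∈ s ∨ ∃ u ∈ s, isChild left right u v := by
  rw [closeStep, PySem.Set.mem_union]
  simp only [List.mem_flatMap, List.mem_filter, List.mem_cons, List.not_mem_nil, or_false,
    isChild, decide_eq_true_eq]
  constructor
  · rintro (h | ⟨u, hu, hv, hne⟩)
    · exact Or.inl h
    · refine Or.inr ⟨u, hu, hne, ?_⟩
      rcases hv with h | h
      · exact Or.inl h.symm
      · exact Or.inr h.symm
  · rintro (h | ⟨u, hu, hne, hv⟩)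
    · exact Or.inl h
    · refine Or.inr ⟨u, hu, ?_, hne⟩
      rcases hv with h | h
      · exact Or.inl h.symm
      · exact Or.inr h.symm

theorem iterClose_facts (left right : List Int) (r : Int) (g : GC left right r) (k : Nat) :
    (iterClose left right r k).Nodup ∧ r ∈ iterClose left right r k ∧
      ∀ v ∈ iterClose left right r k,
        (0 ≤ v ∧ v < (left.length : Int)) ∧ Reach left right r v := by
  induction k with
  | zero =>
    refine ⟨by simp [iterClose, PySem.Set.ofList], by simp [iterClose, PySem.Set.ofList], ?_⟩
    intro v hv
    have : v = r := by simpa [iterClose, PySem.Set.ofList] using hv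
    subst this
    exact ⟨⟨g.hr0, g.hr1⟩, Reach.refl⟩
  | succ k ih =>
    obtain ⟨hnd, hr, hfacts⟩ := ih
    rw [iterClose_succ]
    refine ⟨PySem.Set.nodup_union _ _ hnd, ?_, ?_⟩
    · rw [mem_closeStep]; exact Or.inl hr
    · intro v hv
      rcases (mem_closeStep left right _ v).mp hv with h | ⟨u, hu, hc⟩
      · exact hfacts v h
      · obtain ⟨⟨hu0, hu1⟩, hur⟩ := hfacts u hu
        obtain ⟨hc0, hc1, -, -⟩ := child_facts left right r g hu0 hu1 hc
        exact ⟨⟨hc0, hc1⟩, Reach.step hur hc⟩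

-- one closure step appends; an empty extension means the set is closed under the child relation
theorem closeStep_append (left right : List Int) (s : PySem.Set Int) :
    ∃ e, closeStep left right s = s ++ e ∧
      (e = [] → ∀ u ∈ s, ∀ c, isChild left right u c → c ∈ s) := by
  refine ⟨_, PySem.Set.update_eq_append_filter s _, ?_⟩
  intro he u hu c hc
  rw [List.filter_eq_nil_iff] at he
  by_contra hcs
  refine he c ?_ (by simpa [PySem.Set.contains_iff] using hcs)
  rw [PySem.Set.mem_ofList, List.mem_flatMap]
  obtain ⟨hne, hv⟩ := hc
  refine ⟨u, hu, by rcases hv with h | h <;> simp [h, hne]⟩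

theorem iterClose_closed (left right : List Int) (r : Int) (g : GC left right r) :
    ∀ u ∈ iterClose left right r left.length, ∀ c, isChild left right u c →
      c ∈ iterClose left right r left.length := by
  set n := left.length with hn
  by_cases hstall : ∃ k < n, iterClose left right r (k+1) = iterClose left right r k
  · obtain ⟨k, hk, hkeq⟩ := hstall
    have hstable : ∀ j, iterClose left right r (k + j) = iterClose left right r k := by
      intro j
      induction j with
      | zero => rfl
      | succ j ihj => rw [Nat.add_succ, iterClose_succ, ihj, ← iterClose_succ, hkeq]
    have hne : iterClose left right r n = iterClose left right r k := by
      have h : n = k + (n - k) := by omega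
      rw [h, hstable]
    obtain ⟨e, heq, hclosed⟩ := closeStep_append left right (iterClose left right r k)
    have he : e = [] := by
      have : iterClose left right r k ++ e = iterClose left right r k ++ [] := by
        rw [← heq, ← iterClose_succ, hkeq, List.append_nil]
      exact List.append_cancel_left this
    intro u hu c hc
    rw [hne] at hu ⊢
    exact hclosed he u hu c hc
  · exfalso
    simp only [not_exists, not_and] at hstall
    have hgrow : ∀ k, k ≤ n → k + 1 ≤ (iterClose left right r k).length := by
      intro k
      induction k with
      | zero => intro _; simp [iterClose, PySem.Set.ofList]
      | succ k ihk =>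
        intro hk1
        obtain ⟨e, heq, -⟩ := closeStep_append left right (iterClose left right r k)
        have hneq := hstall k (by omega)
        have hel : e ≠ [] := by
          rintro rfl
          exact hneq (by rw [iterClose_succ, heq, List.append_nil])
        have : 1 ≤ e.length := by
          cases e with
          | nil => exact absurd rfl hel
          | cons a as => simp
        have hlen : (iterClose left right r (k+1)).length =
            (iterClose left right r k).length + e.length := by
          rw [iterClose_succ, heq, List.length_append]
        have := ihk (by omega)
        omega
    have h1 := hgrow n (by omega)
    obtain ⟨hnd, -, hfacts⟩ := iterClose_facts left right r g n
    have h2 := length_le_of_nodup_range n _ hnd (fun v hv => (hfacts v hv).1)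
    omega

theorem iterClose_complete (left right : List Int) (r : Int) (g : GC left right r)
    {v : Int} (hv : Reach left right r v) : v ∈ iterClose left right r left.length := by
  induction hv with
  | refl => exact (iterClose_facts left right r g left.length).2.1
  | step hu hc ih => exact iterClose_closed left right r g _ ih _ hc

theorem solve_eq_solve_alt (left right : List Int) (hpre : Pre_solve left right) :
    solve left right = solve_alt left right := by
  by_cases hg1 : selfGuard left right = true ∨ edgeSum left + edgeSum right ≠ (left.length : Int) - 1
  · simp only [solve, solve_alt, if_pos hg1]
  · obtain ⟨hselfne, hsumne⟩ := not_or.mp hg1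
    have hself : selfGuard left right = false := Bool.not_eq_true _ ▸ eq_false_of_ne_true hselfne
    have hsum : edgeSum left + edgeSum right = (left.length : Int) - 1 := not_ne_iff.mp hsumne
    by_cases hpar : (parentsOf left right).length ≠ 1
    · simp only [solve, solve_alt, if_neg hg1, if_pos hpar]
    · have hpar1 : (parentsOf left right).length = 1 := not_ne_iff.mp hpar
      have hlen : left.length ≤ right.length := by
        rcases hpre with h | h
        · exact h
        · exfalso
          obtain ⟨i, hi, hile, hcase⟩ := h
          have : selfGuard left right = true := by
            rw [selfGuard, List.any_eq_true]
            refine ⟨i, List.mem_range.mpr hi, ?_⟩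
            simp only [PySem.List.pyGetD_natCast, Bool.or_eq_true, decide_eq_true_eq]
            rcases hcase with hc | ⟨hir, hc⟩
            · exact Or.inl hc
            · exact Or.inr hc
          rw [this] at hself
          cases hself
      have g := kids_of_guards left right hlen hself hsum hpar1
      set rt := PySem.List.pyGetD (parentsOf left right) 0 0 with hrt
      obtain ⟨hCn, hCr, hCf⟩ := iterClose_facts left right rt g left.length
      have hCm : ∀ v, v ∈ iterClose left right rt left.length ↔ Reach left right rt v :=
        fun v => ⟨fun h => (hCf v h).2, fun h => iterClose_complete left right rt g h⟩
      have hof : PySem.Set.ofList [rt] = [rt] :=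
        PySem.Set.ofList_eq_self_of_nodup _ (List.nodup_singleton _)
      have hinv : DfsInv left right rt (PySem.Set.ofList [rt]) [rt] := by
        rw [hof]
        refine ⟨List.nodup_singleton _, ?_, ?_, List.mem_singleton.mpr rfl, fun v hv => hv, List.nodup_singleton _, ?_, ?_⟩
        · intro v hv
          rw [List.mem_singleton] at hv
          subst hv
          exact ⟨g.hr0, g.hr1⟩
        · intro v hv
          rw [List.mem_singleton] at hv
          subst hv
          exact Reach.refl
        · intro u hu hnot c hc
          exact absurd hu hnot
        · intro c hc
          rw [List.mem_singleton] at hc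
          exact Or.inl hc
      have hn1 : 1 ≤ left.length := by
        have h0 := g.hr0
        have h1 := g.hr1
        omega
      have hmain := dfsA_eq left right rt g (iterClose left right rt left.length) hCn hCm
        (left.length + 1) (PySem.Set.ofList [rt]) [rt] hinv
        (by rw [hof]; simp; omega)
      simp only [solve, solve_alt, if_neg hg1, if_neg hpar]
      exact hmain

-- ===== VERDICT (by name: the statement is the Claim_ definition above) =====
theorem solve_spec : Claim_equal_solve := by
  intro left right _ hpre
  unfold Spec_solve
  exact solve_eq_solve_alt left right hpre
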